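-- pv_equiv track=rewrite | github.com/angryreid/leetcode | juejin/_02_徒步旅行中的补给问题/solution-pro.py | solution
-- ===== SOURCE A (Python) =====
-- def solution(n, k, data):
--     length = len(data)
--     # Create a dp array; note that we don't need to buy food on the last day
--     dp = [0] * length
--     # Basic case: at least one portion of food must be bought on the first day
--     dp[0] = data[0]
--
--     # Iterate: dp[i] represents the minimum cost of the journey on day i with a weight limit of k
--     for i in range(1, length):
--         # Directly buy food
--         dp[i] = dp[i - 1] + data[i]
--         # Use previously bought food
--         for j in range(i - 1, max(i - k, -1), -1):
--             dp[i] = min(dp[i], dp[i - 1] + data[j])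
--
--     return dp[- 1]
-- ===== SOURCE B (Python) =====
-- def solution(n, k, data):
--     # O(len(data)) monotonic-deque sliding-window minimum instead of A's O(len*k) inner rescans.
--     w = k if k > 1 else 1
--     total = data[0]
--     dq = [0]    # indices whose data values are strictly increasing; active part is dq[head:]
--     head = 0
--     for i in range(1, len(data)):
--         while len(dq) > head and data[dq[-1]] >= data[i]:
--             dq.pop()
--         dq.append(i)
--         if dq[head] <= i - w:
--             head += 1
--         total += data[dq[head]]
--     return total
-- ===== Notes on version B (the rewrite author's own statement) =====
-- stated objective: faster
-- what changed: Replaces A's O(n*k) DP that rescans the last max(k,1) prices for every day by a single pass that maintains a monotonic deque (indices with increasing prices) yielding each sliding-window minimum in amortized O(1), and keeps only the running total instead of the dp array.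
import Mathlib
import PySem

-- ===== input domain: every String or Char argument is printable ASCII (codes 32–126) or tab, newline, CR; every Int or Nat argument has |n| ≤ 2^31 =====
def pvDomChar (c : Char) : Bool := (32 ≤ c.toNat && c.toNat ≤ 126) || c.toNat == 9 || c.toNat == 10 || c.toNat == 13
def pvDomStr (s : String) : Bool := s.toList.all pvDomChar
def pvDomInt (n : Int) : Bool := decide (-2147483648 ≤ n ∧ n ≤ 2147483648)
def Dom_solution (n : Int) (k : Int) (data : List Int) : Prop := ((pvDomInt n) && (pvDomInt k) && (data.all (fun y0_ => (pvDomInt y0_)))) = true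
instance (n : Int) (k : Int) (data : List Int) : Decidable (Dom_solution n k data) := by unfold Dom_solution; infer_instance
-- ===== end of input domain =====

-- B replaces A's per-day rescan of the last max(k,1) prices by a monotonic-deque sliding-window minimum (one pass).

-- ===== PORT A =====
def solution (n : Int) (k : Int) (data : List Int) : Int :=
  let length : Int := PySem.List.len data
  let dp : List Int := List.replicate length.toNat 0   -- [0] * length
  let dp := PySem.List.pySetD dp 0 (PySem.List.pyGetD data 0 0)
  let dp := (PySem.List.pyRange 1 length 1).foldl (fun dp i =>
      let dp := PySem.List.pySetD dp i (PySem.List.pyGetD dp (i-1) 0 + PySem.List.pyGetD data i 0)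
      (PySem.List.pyRange (i-1) (max (i-k) (-1)) (-1)).foldl (fun dp j =>
        PySem.List.pySetD dp i (min (PySem.List.pyGetD dp i 0)
          (PySem.List.pyGetD dp (i-1) 0 + PySem.List.pyGetD data j 0))) dp) dp
  PySem.List.pyGetD dp (-1) 0

-- ===== PORT B =====
-- the `while len(dq) > head and data[dq[-1]] >= data[i]: dq.pop()` loop of Source B
def popLoop (data : List Int) (x : Int) (head : Nat) (dq : List Int) : List Int :=
  if h : head < dq.length ∧ x ≤ PySem.List.pyGetD data (PySem.List.pyGetD dq (-1) 0) 0 then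
    popLoop data x head dq.dropLast
  else dq
termination_by dq.length
decreasing_by
  have hne : dq ≠ [] := by intro he; subst he; simp at h
  have : 0 < dq.length := List.length_pos_iff.mpr hne
  simp [List.length_dropLast]; omega

def solution_alt (n : Int) (k : Int) (data : List Int) : Int :=
  let w : Int := if 1 < k then k else 1
  let st := (PySem.List.pyRange 1 (PySem.List.len data) 1).foldl
    (fun (st : Int × List Int × Nat) i =>
      let dq := popLoop data (PySem.List.pyGetD data i 0) st.2.2 st.2.1
      let dq := dq ++ [i]
      let head := if PySem.List.pyGetD dq (st.2.2 : Int) 0 ≤ i - w then st.2.2 + 1 else st.2.2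
      (st.1 + PySem.List.pyGetD data (PySem.List.pyGetD dq (head : Int) 0) 0, dq, head))
    (PySem.List.pyGetD data 0 0, ([0] : List Int), (0 : Nat))
  st.1

-- ===== PRECONDITION & SPEC =====
-- Pre_ excludes only data = [], on which Python A raises IndexError (at data[0]).
def Pre_solution (n : Int) (k : Int) (data : List Int) : Prop := data ≠ []
instance (n : Int) (k : Int) (data : List Int) : Decidable (Pre_solution n k data) := by unfold Pre_solution; infer_instance
def pvWitness_solution : Int × Int × List Int := (5, 2, [3, 1, 4])

def Spec_solution (n : Int) (k : Int) (data : List Int) (out : Int) : Prop := out = solution_alt n k data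
instance (n : Int) (k : Int) (data : List Int) (out : Int) : Decidable (Spec_solution n k data out) := by unfold Spec_solution; infer_instance

-- ===== CLAIM (what is proved, stated in full; the proofs are below) =====
def Claim_equal_solution : Prop := ∀ (n : Int) (k : Int) (data : List Int), Dom_solution n k data → Pre_solution n k data → Spec_solution n k data (solution n k data)

-- ===== LEMMAS AND PROOFS =====

-- value of data at an Int index (total form; all indices used lie in range on Pre_)
def gv (data : List Int) (j : Int) : Int := PySem.List.pyGetD data j 0

-- the minimum A's inner loop folds in for day i (exactly A's iteration order)
def winMin (k : Int) (data : List Int) (i : Int) : Int :=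
  (PySem.List.pyRange (i-1) (max (i-k) (-1)) (-1)).foldl (fun a j => min a (gv data j)) (gv data i)

-- running total: minimum cost through day t
def S (k : Int) (data : List Int) : Nat → Int
  | 0 => gv data 0
  | (t+1) => S k data t + winMin k data ((t : Int) + 1)

-- the window of indices whose minimum is added on day i
def Win (k : Int) (i j : Int) : Prop := i - max k 1 < j ∧ 0 ≤ j ∧ j ≤ i

-- small getD/set toolbox
lemma getD_set_self (l : List Int) (m : Nat) (v : Int) (h : m < l.length) :
    (l.set m v).getD m 0 = v := by
  simp [List.getD_eq_getElem?_getD, h]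

lemma getD_set_ne (l : List Int) (m t : Nat) (v : Int) (h : t ≠ m) :
    (l.set m v).getD t 0 = l.getD t 0 := by
  simp [List.getD_eq_getElem?_getD, List.getElem?_set, h.symm]

lemma set_getD_self (l : List Int) (m : Nat) (h : m < l.length) :
    l.set m (l.getD m 0) = l := by
  rw [List.getD_eq_getElem l 0 h]; exact List.set_getElem_self h

lemma getD_append_len (dead l : List Int) (d : Int) :
    (dead ++ l).getD dead.length d = l.getD 0 d := by
  simp [List.getD_eq_getElem?_getD, List.getElem?_append_right (le_refl dead.length)]

lemma pyGetD_append_len (dead l : List Int) (d : Int) :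
    PySem.List.pyGetD (dead ++ l) ((dead.length : Nat) : Int) d = l.getD 0 d := by
  rw [PySem.List.pyGetD_natCast]; exact getD_append_len dead l d

lemma foldl_pyRange_succ {α : Type} (f : α → Int → α) (init : α) (M : Nat) (h : 1 ≤ M) :
    (PySem.List.pyRange 1 ((M : Int) + 1) 1).foldl f init
      = f ((PySem.List.pyRange 1 (M : Int) 1).foldl f init) (M : Int) := by
  rw [PySem.List.pyRange_one_succ_right (by exact_mod_cast h), List.foldl_append,
    List.foldl_cons, List.foldl_nil]

-- generic foldl-min facts
lemma fmin_le_init (f : Int → Int) (js : List Int) (x : Int) :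
    js.foldl (fun a j => min a (f j)) x ≤ x := by
  induction js generalizing x with
  | nil => simp
  | cons j js ih => exact le_trans (ih _) (min_le_left _ _)

lemma fmin_le_mem (f : Int → Int) (js : List Int) :
    ∀ (x j : Int), j ∈ js → js.foldl (fun a j => min a (f j)) x ≤ f j := by
  induction js with
  | nil => intro x j hj; simp at hj
  | cons a as ih =>
    intro x j hj
    simp only [List.foldl_cons]
    rcases List.mem_cons.mp hj with h | h
    · subst h; exact le_trans (fmin_le_init f as _) (min_le_right _ _)
    · exact ih _ _ h

lemma fmin_cases (f : Int → Int) (js : List Int) :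
    ∀ x : Int, js.foldl (fun a j => min a (f j)) x = x ∨
      ∃ j ∈ js, js.foldl (fun a j => min a (f j)) x = f j := by
  induction js with
  | nil => intro x; left; rfl
  | cons a as ih =>
    intro x
    simp only [List.foldl_cons]
    rcases ih (min x (f a)) with h | ⟨j, hj, h⟩
    · rcases min_cases x (f a) with ⟨he, _⟩ | ⟨he, _⟩
      · left; rw [h, he]
      · right; exact ⟨a, List.Mem.head as, by rw [h, he]⟩
    · right; exact ⟨j, List.mem_cons_of_mem _ hj, h⟩

lemma foldl_min_add (c : Int) (f : Int → Int) (js : List Int) (x : Int) :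
    js.foldl (fun a j => min a (c + f j)) (c + x) = c + js.foldl (fun a j => min a (f j)) x := by
  induction js generalizing x with
  | nil => rfl
  | cons a as ih =>
    simp only [List.foldl_cons]
    rw [min_add_add_left]
    exact ih (min x (f a))

-- window characterisation of A's inner fold
lemma winMin_le {k : Int} (data : List Int) {i j : Int} (hw : Win k i j) :
    winMin k data i ≤ gv data j := by
  obtain ⟨h1, h2, h3⟩ := hw
  rcases eq_or_lt_of_le h3 with h | h
  · subst h; exact fmin_le_init _ _ _
  · apply fmin_le_mem
    rw [PySem.List.mem_pyRange_neg_one]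
    omega

lemma winMin_mem (k : Int) (data : List Int) {i : Int} (hi : 0 ≤ i) :
    ∃ j, Win k i j ∧ winMin k data i = gv data j := by
  rcases fmin_cases (gv data) (PySem.List.pyRange (i-1) (max (i-k) (-1)) (-1)) (gv data i)
    with h | ⟨j, hj, h⟩
  · exact ⟨i, ⟨by omega, hi, le_refl _⟩, h⟩
  · rw [PySem.List.mem_pyRange_neg_one] at hj
    exact ⟨j, ⟨by omega, by omega, by omega⟩, h⟩

-- ===== A-side =====

def dpFold (k : Int) (data : List Int) (M : Nat) : List Int :=
  (PySem.List.pyRange 1 (M : Int) 1).foldl (fun dp i =>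
      (PySem.List.pyRange (i-1) (max (i-k) (-1)) (-1)).foldl (fun dp j =>
        PySem.List.pySetD dp i (min (PySem.List.pyGetD dp i 0)
          (PySem.List.pyGetD dp (i-1) 0 + PySem.List.pyGetD data j 0)))
        (PySem.List.pySetD dp i (PySem.List.pyGetD dp (i-1) 0 + PySem.List.pyGetD data i 0)))
    (PySem.List.pySetD (List.replicate data.length 0) 0 (PySem.List.pyGetD data 0 0))

lemma inner_fold (data : List Int) (m m1 : Nat) (c : Int) (js : List Int) :
    ∀ dp : List Int, m < dp.length → m1 ≠ m → dp.getD m1 0 = c →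
    js.foldl (fun dp j => dp.set m (min (dp.getD m 0) (dp.getD m1 0 + PySem.List.pyGetD data j 0))) dp
      = dp.set m (js.foldl (fun a j => min a (c + PySem.List.pyGetD data j 0)) (dp.getD m 0)) := by
  induction js with
  | nil => intro dp hm _ _; exact (set_getD_self dp m hm).symm
  | cons j js ih =>
    intro dp hm hne hc
    simp only [List.foldl_cons]
    rw [ih (dp.set m (min (dp.getD m 0) (dp.getD m1 0 + PySem.List.pyGetD data j 0)))
        (by simpa using hm) hne (by rw [getD_set_ne _ _ _ _ hne]; exact hc)]
    rw [getD_set_self _ _ _ hm, List.set_set, hc]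

lemma dpFold_one (k : Int) (data : List Int) :
    dpFold k data 1 = (List.replicate data.length 0).set 0 (PySem.List.pyGetD data 0 0) := by
  unfold dpFold
  rw [show ((1:Nat):Int) = 1 by norm_num, PySem.List.pyRange_one_eq_nil (le_refl 1), List.foldl_nil,
    PySem.List.pySetD_of_nonneg _ _ (le_refl (0:Int))]
  norm_num

lemma A_loop (k : Int) (data : List Int) (hne : data ≠ []) :
    ∀ M : Nat, 1 ≤ M → M ≤ data.length →
      (dpFold k data M).length = data.length ∧
      ∀ t : Nat, t < M → (dpFold k data M).getD t 0 = S k data t := by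
  have hL : 0 < data.length := List.length_pos_iff.mpr hne
  intro M
  induction M with
  | zero => intro h; exact absurd h (by norm_num)
  | succ M ih =>
    intro _ hML
    by_cases hM0 : M = 0
    · subst hM0
      rw [dpFold_one]
      refine ⟨by simp, ?_⟩
      intro t ht
      have ht0 : t = 0 := by omega
      subst ht0
      rw [getD_set_self _ _ _ (by simpa using hL)]
      rfl
    · have hM1 : 1 ≤ M := by omega
      have hMlt : M < data.length := by omega
      obtain ⟨hlen, hval⟩ := ih hM1 (by omega)
      have hM1c : (M:Int) - 1 = ((M - 1 : Nat) : Int) := by omega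
      have key1 : dpFold k data (M+1) = (fun dp (i : Int) =>
          (PySem.List.pyRange (i-1) (max (i-k) (-1)) (-1)).foldl (fun dp j =>
            PySem.List.pySetD dp i (min (PySem.List.pyGetD dp i 0)
              (PySem.List.pyGetD dp (i-1) 0 + PySem.List.pyGetD data j 0)))
            (PySem.List.pySetD dp i (PySem.List.pyGetD dp (i-1) 0 + PySem.List.pyGetD data i 0)))
          (dpFold k data M) (M:Int) := by
        unfold dpFold
        rw [show ((M+1:Nat):Int) = (M:Int)+1 by push_cast; ring]
        exact foldl_pyRange_succ _ _ M hM1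
      have key : dpFold k data (M+1) = (dpFold k data M).set M (S k data M) := by
        rw [key1]
        simp only [hM1c, PySem.List.pySetD_natCast, PySem.List.pyGetD_natCast]
        rw [hval (M-1) (by omega)]
        rw [inner_fold data M (M-1) (S k data (M-1)) _
          ((dpFold k data M).set M (S k data (M-1) + data.getD M 0))
          (by simpa [hlen] using hMlt) (by omega)
          (by rw [getD_set_ne _ _ _ _ (by omega)]; exact hval (M-1) (by omega))]
        rw [getD_set_self _ _ _ (by simpa [hlen] using hMlt), List.set_set]
        rw [foldl_min_add (S k data (M-1)) (fun j => PySem.List.pyGetD data j 0)]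
        congr 1
        have hSM : S k data M = S k data (M-1) + winMin k data (((M-1:Nat):Int)+1) := by
          conv_lhs => rw [show M = (M-1)+1 by omega]
          rfl
        rw [hSM]
        congr 1
        unfold winMin gv
        rw [show ((M-1:Nat):Int)+1 = (M:Int) by omega, hM1c]
        simp only [PySem.List.pyGetD_natCast]
      rw [key]
      refine ⟨by simpa using hlen, ?_⟩
      intro t ht
      by_cases htM : t = M
      · subst htM
        rw [getD_set_self _ _ _ (by simpa [hlen] using hMlt)]
      · rw [getD_set_ne _ _ _ _ htM]
        exact hval t (by omega)

lemma A_eq (n k : Int) (data : List Int) (hne : data ≠ []) :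
    solution n k data = S k data (data.length - 1) := by
  have hL : 0 < data.length := List.length_pos_iff.mpr hne
  obtain ⟨hlen, hval⟩ := A_loop k data hne data.length (by omega) (le_refl _)
  have hsol : solution n k data = PySem.List.pyGetD (dpFold k data data.length) (-1) 0 := by
    unfold solution dpFold
    simp only [PySem.List.len_eq, Int.toNat_natCast]
  rw [hsol]
  have hdne : dpFold k data data.length ≠ [] := by
    intro h
    rw [h] at hlen
    simp at hlen
    omega
  rw [PySem.List.pyGetD_neg_one _ _ hdne, List.getLast_eq_getElem,
    ← List.getD_eq_getElem _ 0 (by omega), hlen]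
  exact hval _ (by omega)

-- ===== B-side =====

def stepB (k : Int) (data : List Int) (st : Int × List Int × Nat) (i : Int) : Int × List Int × Nat :=
  let dq := popLoop data (PySem.List.pyGetD data i 0) st.2.2 st.2.1
  let dq := dq ++ [i]
  let head := if PySem.List.pyGetD dq (st.2.2 : Int) 0 ≤ i - (if 1 < k then k else 1) then st.2.2 + 1 else st.2.2
  (st.1 + PySem.List.pyGetD data (PySem.List.pyGetD dq (head : Int) 0) 0, dq, head)

def foldB (k : Int) (data : List Int) (M : Nat) : Int × List Int × Nat :=
  (PySem.List.pyRange 1 (M : Int) 1).foldl (stepB k data) (PySem.List.pyGetD data 0 0, [0], 0)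

lemma popLoop_filter (data : List Int) (x : Int) (dead : List Int) :
    ∀ act : List Int, act.Pairwise (fun a b => gv data a < gv data b) →
    popLoop data x dead.length (dead ++ act) = dead ++ act.filter (fun j => decide (gv data j < x)) := by
  intro act
  induction act using List.reverseRecOn with
  | nil => intro _; rw [popLoop]; simp
  | append_singleton as a ih =>
    intro hsort
    have hsort' : as.Pairwise (fun a b => gv data a < gv data b) :=
      (List.pairwise_append.mp hsort).1
    have hrel : ∀ b ∈ as, gv data b < gv data a := by
      intro b hb
      exact (List.pairwise_append.mp hsort).2.2 b hb a (by simp)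
    rw [popLoop]
    have hlast : PySem.List.pyGetD (dead ++ (as ++ [a])) (-1) 0 = a := by
      rw [← List.append_assoc]
      exact PySem.List.pyGetD_neg_one_append_singleton _ _ _
    by_cases hax : x ≤ gv data a
    · rw [dif_pos ⟨by simp only [List.length_append, List.length_cons, List.length_nil]; omega,
        by rw [hlast]; exact hax⟩]
      have hdl : (dead ++ (as ++ [a])).dropLast = dead ++ as := by
        rw [← List.append_assoc]; exact List.dropLast_concat
      rw [hdl, ih hsort']
      have hfa : ¬ (gv data a < x) := by omega
      simp [List.filter_append, hfa]
    · replace hax : gv data a < x := not_le.mp hax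
      have hcond : ¬ (dead.length < (dead ++ (as ++ [a])).length ∧
          x ≤ PySem.List.pyGetD data (PySem.List.pyGetD (dead ++ (as ++ [a])) (-1) 0) 0) := by
        rw [hlast]; intro hc; exact absurd hc.2 (not_le.mpr hax)
      rw [dif_neg hcond]
      have hall : ∀ b ∈ as ++ [a], gv data b < x := by
        intro b hb
        rcases List.mem_append.mp hb with h | h
        · exact lt_trans (hrel b h) hax
        · simp at h; subst h; exact hax
      rw [List.filter_eq_self.mpr (fun b hb => by simpa using hall b hb)]

-- domination carries over one step of the deque
lemma dom_step (k : Int) (data : List Int) (M : Nat) (act act2 : List Int) (x : Int)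
    (hx : x = gv data (M:Int))
    (hdom : ∀ j : Int, Win k ((M:Int)-1) j → ∃ e ∈ act, j ≤ e ∧ gv data e ≤ gv data j)
    (hM2 : (M:Int) ∈ act2)
    (hkeep : ∀ e ∈ act, gv data e < x → (M:Int) - max k 1 < e → e ∈ act2) :
    ∀ j : Int, Win k (M:Int) j → ∃ e ∈ act2, j ≤ e ∧ gv data e ≤ gv data j := by
  intro j hwj
  obtain ⟨hw1, hw2, hw3⟩ := hwj
  by_cases hjM : j = (M:Int)
  · subst hjM; exact ⟨_, hM2, le_refl _, le_refl _⟩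
  · have hwj' : Win k ((M:Int)-1) j := ⟨by omega, hw2, by omega⟩
    obtain ⟨e, he, hje, hge⟩ := hdom j hwj'
    by_cases hex : gv data e < x
    · exact ⟨e, hkeep e he hex (by omega), hje, hge⟩
    · refine ⟨(M:Int), hM2, hw3, ?_⟩
      rw [← hx]
      exact le_trans (not_lt.mp hex) hge

-- all surviving deque members lie in the current window
lemma win_all (k i : Int) (act2 : List Int) (h2 : Int) (t2 : List Int) (h2t : act2 = h2 :: t2)
    (hidx2 : act2.Pairwise (· < ·)) (hh2 : i - max k 1 < h2)
    (hb : ∀ j ∈ act2, 0 ≤ j ∧ j ≤ i) : ∀ j ∈ act2, Win k i j := by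
  intro j hj
  obtain ⟨hb1, hb2⟩ := hb j hj
  have hle : h2 ≤ j := by
    rw [h2t] at hj hidx2
    rcases List.mem_cons.mp hj with h | h
    · omega
    · exact le_of_lt ((List.pairwise_cons.mp hidx2).1 j h)
  exact ⟨by omega, hb1, hb2⟩

-- the front of the deque carries the window minimum
lemma head_min (k : Int) (data : List Int) (i : Int) (hi : 0 ≤ i) (act2 : List Int)
    (h2 : Int) (t2 : List Int) (h2t : act2 = h2 :: t2)
    (hval2 : act2.Pairwise (fun a b => gv data a < gv data b))
    (hwin2 : ∀ j ∈ act2, Win k i j)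
    (hdom2 : ∀ j : Int, Win k i j → ∃ e ∈ act2, j ≤ e ∧ gv data e ≤ gv data j) :
    gv data h2 = winMin k data i := by
  have hmin2 : ∀ j ∈ act2, gv data h2 ≤ gv data j := by
    intro j hj
    rw [h2t] at hj hval2
    rcases List.mem_cons.mp hj with h | h
    · rw [h]
    · exact le_of_lt ((List.pairwise_cons.mp hval2).1 j h)
  apply le_antisymm
  · obtain ⟨j0, hwj0, hj0⟩ := winMin_mem k data hi
    obtain ⟨e, he2, _, hgve⟩ := hdom2 j0 hwj0
    rw [hj0]
    exact le_trans (hmin2 e he2) hgve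
  · exact winMin_le data (hwin2 h2 (by rw [h2t]; exact List.Mem.head _))

lemma B_loop (k : Int) (data : List Int) (hne : data ≠ []) :
    ∀ M : Nat, 1 ≤ M → M ≤ data.length →
      ∃ dead act : List Int,
        foldB k data M = (S k data (M-1), dead ++ act, dead.length)
      ∧ act ≠ []
      ∧ act.Pairwise (· < ·)
      ∧ (∀ j ∈ act, Win k ((M : Int) - 1) j)
      ∧ act.getLast? = some ((M : Int) - 1)
      ∧ act.Pairwise (fun a b => gv data a < gv data b)
      ∧ (∀ j : Int, Win k ((M : Int) - 1) j → ∃ e ∈ act, j ≤ e ∧ gv data e ≤ gv data j) := by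
  have ifmax : (if 1 < k then k else 1) = max k 1 := by
    split_ifs with h
    · exact (max_eq_left h.le).symm
    · exact (max_eq_right (not_lt.mp h)).symm
  intro M
  induction M with
  | zero => intro h; exact absurd h (by norm_num)
  | succ M ih =>
    intro _ hML
    by_cases hM0 : M = 0
    · subst hM0
      refine ⟨[], [0], ?_, by simp, by simp, ?_, by simp, by simp, ?_⟩
      · unfold foldB
        rw [show ((1:Nat):Int) = 1 by norm_num, PySem.List.pyRange_one_eq_nil (le_refl 1),
          List.foldl_nil]
        rfl
      · intro j hj
        simp at hj
        subst hj
        refine ⟨by omega, le_refl 0, by omega⟩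
      · intro j hwj
        obtain ⟨_, hw2, hw3⟩ := hwj
        have hj0 : j = 0 := by omega
        subst hj0
        exact ⟨0, by simp, le_refl 0, le_refl _⟩
    · have hM1 : 1 ≤ M := by omega
      obtain ⟨dead, act, heq, hane, hidx, hwin, hlastq, hvalp, hdom⟩ := ih hM1 (by omega)
      have hcast : ((M+1:Nat):Int) - 1 = (M:Int) := by push_cast; ring
      have hfold : foldB k data (M+1) = stepB k data (foldB k data M) (M:Int) := by
        unfold foldB
        rw [show ((M+1:Nat):Int) = (M:Int)+1 by push_cast; ring]
        exact foldl_pyRange_succ _ _ M hM1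
      rw [heq] at hfold
      simp only [stepB, ifmax] at hfold
      rw [popLoop_filter data (PySem.List.pyGetD data (M:Int) 0) dead act hvalp] at hfold
      rw [List.append_assoc] at hfold
      set x := PySem.List.pyGetD data (M:Int) 0 with hxdef
      set actF := act.filter (fun j => decide (gv data j < x)) with hactF
      set act1 := actF ++ [(M:Int)] with hact1
      rw [pyGetD_append_len dead act1 0] at hfold
      have hx : x = gv data (M:Int) := rfl
      -- facts about actF and act1
      have hsubF : ∀ j ∈ actF, j ∈ act ∧ gv data j < x := by
        intro j hj
        rw [hactF] at hj
        have := List.mem_filter.mp hj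
        exact ⟨this.1, by simpa using this.2⟩
      have hwinOld : ∀ j ∈ act, (M:Int) - 1 - max k 1 < j ∧ 0 ≤ j ∧ j ≤ (M:Int) - 1 := hwin
      have hidxF : actF.Pairwise (· < ·) := List.Pairwise.filter _ hidx
      have hvalF : actF.Pairwise (fun a b => gv data a < gv data b) := List.Pairwise.filter _ hvalp
      have hltM : ∀ j ∈ actF, j < (M:Int) := by
        intro j hj
        have := (hwinOld j (hsubF j hj).1).2.2
        omega
      have hidx1 : act1.Pairwise (· < ·) := by
        rw [hact1]
        refine List.pairwise_append.mpr ⟨hidxF, List.pairwise_singleton _ _, ?_⟩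
        intro a ha b hb
        simp at hb
        subst hb
        exact hltM a ha
      have hval1 : act1.Pairwise (fun a b => gv data a < gv data b) := by
        rw [hact1]
        refine List.pairwise_append.mpr ⟨hvalF, List.pairwise_singleton _ _, ?_⟩
        intro a ha b hb
        simp at hb
        subst hb
        exact (hsubF a ha).2
      have h1le : ∀ j ∈ act1, 0 ≤ j ∧ j ≤ (M:Int) := by
        intro j hj
        rw [hact1] at hj
        rcases List.mem_append.mp hj with h | h
        · have h1 := (hwinOld j (hsubF j h).1).2.1
          have h2 := hltM j h
          omega
        · simp at h; subst h; omega
      have hlast1 : act1.getLast? = some (M:Int) := List.getLast?_concat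
      have hM2' : (M:Int) ∈ act1 := by rw [hact1]; simp
      by_cases hcond : act1.getD 0 0 ≤ (M:Int) - max k 1
      · -- eviction: the stale front leaves the deque
        rw [if_pos hcond] at hfold
        have hFne : actF ≠ [] := by
          intro h0
          rw [hact1, h0] at hcond
          simp only [List.nil_append, List.getD_cons_zero] at hcond
          omega
        obtain ⟨f0, fr, hf⟩ := List.ne_nil_iff_exists_cons.mp hFne
        have hsplit : act1 = f0 :: (fr ++ [(M:Int)]) := by rw [hact1, hf]; rfl
        set act2 : List Int := fr ++ [(M:Int)] with hact2
        have hddl : dead ++ act1 = (dead ++ [f0]) ++ act2 := by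
          rw [hsplit, hact2]; simp
        have hlen1 : ((dead.length + 1 : Nat) : Int) = (((dead ++ [f0]).length : Nat) : Int) := by
          simp
        rw [hddl, hlen1, pyGetD_append_len] at hfold
        have hf0 : act1.getD 0 0 = f0 := by rw [hsplit]; rfl
        rw [hf0] at hcond
        have hf0low : (M:Int) - 1 - max k 1 < f0 :=
          (hwinOld f0 (hsubF f0 (by rw [hf]; exact List.Mem.head _)).1).1
        have hM2 : (M:Int) ∈ act2 := by rw [hact2]; simp
        have hne2 : act2 ≠ [] := by rw [hact2]; simp
        have hidx2 : act2.Pairwise (· < ·) := (List.pairwise_cons.mp (hsplit ▸ hidx1)).2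
        have hval2 : act2.Pairwise (fun a b => gv data a < gv data b) :=
          (List.pairwise_cons.mp (hsplit ▸ hval1)).2
        have hsub12 : ∀ j ∈ act2, j ∈ act1 := by
          rw [hsplit]; exact fun j hj => List.mem_cons_of_mem _ hj
        have hlast2 : act2.getLast? = some (M:Int) := List.getLast?_concat
        obtain ⟨h2, t2, h2t⟩ := List.ne_nil_iff_exists_cons.mp hne2
        have hgetD2 : act2.getD 0 0 = h2 := by rw [h2t]; rfl
        have hh2 : (M:Int) - max k 1 < h2 := by
          rcases fr with _ | ⟨f1, fr'⟩
          · have : h2 = (M:Int) := by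
              rw [hact2] at h2t
              simp at h2t
              exact h2t.1.symm
            omega
          · have hh2f1 : h2 = f1 := by
              rw [hact2] at h2t
              simp at h2t
              exact h2t.1.symm
            have hf01 : f0 < f1 := by
              have := (List.pairwise_cons.mp (hsplit ▸ hidx1)).1 f1 (List.mem_append_left _ (List.Mem.head _))
              exact this
            omega
        have hwin2 : ∀ j ∈ act2, Win k (M:Int) j :=
          win_all k (M:Int) act2 h2 t2 h2t hidx2 (by omega)
            (fun j hj => h1le j (hsub12 j hj))
        have hkeep : ∀ e ∈ act, gv data e < x → (M:Int) - max k 1 < e → e ∈ act2 := by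
          intro e he hex hlow
          have heF : e ∈ actF := by
            rw [hactF]
            exact List.mem_filter.mpr ⟨he, by simpa using hex⟩
          rw [hf] at heF
          rcases List.mem_cons.mp heF with h | h
          · omega
          · rw [hact2]; exact List.mem_append_left _ h
        have hdom2 := dom_step k data M act act2 x hx hdom hM2 hkeep
        have hmin := head_min k data (M:Int) (by omega) act2 h2 t2 h2t hval2 hwin2 hdom2
        refine ⟨dead ++ [f0], act2, ?_, hne2, hidx2, ?_, ?_, hval2, ?_⟩
        · rw [hfold, hgetD2]
          have hlen2 : dead.length + 1 = (dead ++ [f0]).length := by simp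
          have hS : S k data (M+1-1) = S k data (M-1) + gv data h2 := by
            rw [show M+1-1 = (M-1)+1 by omega]
            show S k data (M-1) + winMin k data (((M-1:Nat):Int)+1) = _
            rw [show ((M-1:Nat):Int)+1 = (M:Int) by omega, ← hmin]
          rw [hS, hlen2]
          rfl
        · intro j hj; rw [hcast]; exact hwin2 j hj
        · rw [hcast]; exact hlast2
        · intro j hwj; rw [hcast] at hwj; exact hdom2 j hwj
      · -- no eviction
        rw [if_neg hcond] at hfold
        rw [pyGetD_append_len dead act1 0] at hfold
        obtain ⟨h2, t2, h2t⟩ := List.ne_nil_iff_exists_cons.mp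
          (show act1 ≠ [] by rw [hact1]; simp)
        have hgetD2 : act1.getD 0 0 = h2 := by rw [h2t]; rfl
        have hh2 : (M:Int) - max k 1 < h2 := by
          rw [hgetD2] at hcond
          omega
        have hwin2 : ∀ j ∈ act1, Win k (M:Int) j :=
          win_all k (M:Int) act1 h2 t2 h2t hidx1 (by omega) h1le
        have hkeep : ∀ e ∈ act, gv data e < x → (M:Int) - max k 1 < e → e ∈ act1 := by
          intro e he hex _
          rw [hact1]
          refine List.mem_append_left _ ?_
          rw [hactF]
          exact List.mem_filter.mpr ⟨he, by simpa using hex⟩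
        have hdom2 := dom_step k data M act act1 x hx hdom hM2' hkeep
        have hmin := head_min k data (M:Int) (by omega) act1 h2 t2 h2t hval1 hwin2 hdom2
        refine ⟨dead, act1, ?_, by rw [hact1]; simp, hidx1, ?_, ?_, hval1, ?_⟩
        · rw [hfold, hgetD2]
          have hS : S k data (M+1-1) = S k data (M-1) + gv data h2 := by
            rw [show M+1-1 = (M-1)+1 by omega]
            show S k data (M-1) + winMin k data (((M-1:Nat):Int)+1) = _
            rw [show ((M-1:Nat):Int)+1 = (M:Int) by omega, ← hmin]
          rw [hS]
          rfl
        · intro j hj; rw [hcast]; exact hwin2 j hj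
        · rw [hcast]; exact hlast1
        · intro j hwj; rw [hcast] at hwj; exact hdom2 j hwj

lemma B_eq (n k : Int) (data : List Int) (hne : data ≠ []) :
    solution_alt n k data = S k data (data.length - 1) := by
  have hL : 0 < data.length := List.length_pos_iff.mpr hne
  have halt : solution_alt n k data = (foldB k data data.length).1 := by
    unfold solution_alt foldB stepB
    simp only [PySem.List.len_eq]
  obtain ⟨dead, act, heq, -⟩ := B_loop k data hne data.length (by omega) (le_refl _)
  rw [halt, heq]

-- ===== VERDICT (by name: the statement is the Claim_ definition above) =====
theorem solution_spec : Claim_equal_solution := by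
  intro n k data _ hpre
  unfold Spec_solution
  rw [A_eq n k data hpre, B_eq n k data hpre]
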